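-- pv_equiv track=rewrite | github.com/fatihaltiok/Agentus-Timus | tests/test_dr_integration.py | _simulate_verify
-- ===== SOURCE A (Python) =====
-- def _simulate_verify(source_counts: list, mode: str) -> dict:
--     """Simuliert die Kern-Logik aus _deep_verify_facts."""
--     verified = []
--     tentative = []
--     unverified = []
--     for sc in source_counts:
--         if mode == "strict":
--             if sc >= 3:
--                 verified.append(sc)
--             elif sc == 2:
--                 tentative.append(sc)
--             else:
--                 unverified.append(sc)
--         elif mode == "moderate":
--             if sc >= 2:
--                 verified.append(sc)
--             elif sc == 1:
--                 tentative.append(sc)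
--             else:
--                 unverified.append(sc)
--         else:  # light
--             if sc >= 1:
--                 verified.append(sc)
--             else:
--                 unverified.append(sc)
--     return {"verified": len(verified), "tentative": len(tentative), "unverified": len(unverified)}
-- ===== SOURCE B (Python) =====
-- def _simulate_verify(source_counts: list, mode: str) -> dict:
--     """Hoist the mode decision out of the loop, then count with
--     a comprehension / list.count and get unverified by subtraction."""
--     if mode == "strict":
--         v_thresh, t_val = 3, 2
--     elif mode == "moderate":
--         v_thresh, t_val = 2, 1
--     else:  # light
--         v_thresh, t_val = 1, None
--     verified = sum(1 for sc in source_counts if sc >= v_thresh)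
--     tentative = source_counts.count(t_val) if t_val is not None else 0
--     unverified = len(source_counts) - verified - tentative
--     return {"verified": verified, "tentative": tentative, "unverified": unverified}
-- ===== Notes on version B (the rewrite author's own statement) =====
-- stated objective: simpler
-- what changed: Derives (v_thresh, t_val) from mode once before any loop, counts verified with a single comprehension and tentative with list.count, and computes unverified by subtraction instead of A's per-element mode branch appending to three lists.
import Mathlib
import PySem

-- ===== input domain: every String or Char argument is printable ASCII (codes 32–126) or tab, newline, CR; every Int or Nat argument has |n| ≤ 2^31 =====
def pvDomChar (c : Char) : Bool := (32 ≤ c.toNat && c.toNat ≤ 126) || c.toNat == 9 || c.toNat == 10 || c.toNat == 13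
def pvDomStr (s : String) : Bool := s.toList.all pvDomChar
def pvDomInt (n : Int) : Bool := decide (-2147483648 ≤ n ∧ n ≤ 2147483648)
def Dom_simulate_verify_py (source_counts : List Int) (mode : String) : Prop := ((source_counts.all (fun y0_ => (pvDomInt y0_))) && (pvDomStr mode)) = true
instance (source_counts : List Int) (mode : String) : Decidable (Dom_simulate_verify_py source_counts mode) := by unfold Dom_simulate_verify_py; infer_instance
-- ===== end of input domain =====

-- B hoists the mode decision out of the loop and counts instead of building lists (objective: simpler).

-- ===== PORT A =====
-- A: one loop over source_counts, branching on mode per element, appending to three lists; returns their lengths.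
def simulate_verify_py (source_counts : List Int) (mode : String) : List (String × Int) :=
  let st := source_counts.foldl (fun (acc : List Int × List Int × List Int) sc =>
    if mode = "strict" then
      if 3 ≤ sc then (acc.1 ++ [sc], acc.2.1, acc.2.2)
      else if sc = 2 then (acc.1, acc.2.1 ++ [sc], acc.2.2)
      else (acc.1, acc.2.1, acc.2.2 ++ [sc])
    else if mode = "moderate" then
      if 2 ≤ sc then (acc.1 ++ [sc], acc.2.1, acc.2.2)
      else if sc = 1 then (acc.1, acc.2.1 ++ [sc], acc.2.2)
      else (acc.1, acc.2.1, acc.2.2 ++ [sc])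
    else
      if 1 ≤ sc then (acc.1 ++ [sc], acc.2.1, acc.2.2)
      else (acc.1, acc.2.1, acc.2.2 ++ [sc])) ([], [], [])
  [("verified", (st.1.length : Int)), ("tentative", (st.2.1.length : Int)), ("unverified", (st.2.2.length : Int))]

-- ===== PORT B =====
-- B: thresholds derived from mode once; verified via a filtered count, tentative via list.count, unverified by subtraction.
def simulate_verify_py_alt (source_counts : List Int) (mode : String) : List (String × Int) :=
  let vt : Int × Option Int :=
    if mode = "strict" then (3, some 2)
    else if mode = "moderate" then (2, some 1)
    else (1, none)
  let verified : Int := ((source_counts.filter (fun sc => decide (vt.1 ≤ sc))).length : Int)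
  let tentative : Int :=
    match vt.2 with
    | some t => (PySem.List.count source_counts t : Int)
    | none => 0
  let unverified : Int := (source_counts.length : Int) - verified - tentative
  [("verified", verified), ("tentative", tentative), ("unverified", unverified)]

-- ===== PRECONDITION & SPEC =====
def Spec_simulate_verify_py (source_counts : List Int) (mode : String) (out : List (String × Int)) : Prop := out = simulate_verify_py_alt source_counts mode
instance (source_counts : List Int) (mode : String) (out : List (String × Int)) : Decidable (Spec_simulate_verify_py source_counts mode out) := by unfold Spec_simulate_verify_py; infer_instance

-- ===== CLAIM (what is proved, stated in full; the proofs are below) =====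
def Claim_equal_simulate_verify_py : Prop := ∀ (source_counts : List Int) (mode : String), Dom_simulate_verify_py source_counts mode → Spec_simulate_verify_py source_counts mode (simulate_verify_py source_counts mode)

-- ===== LEMMAS AND PROOFS =====

-- Closed form of A's three-way classifying fold.
theorem foldl_classify (P Q : Int → Prop) [DecidablePred P] [DecidablePred Q]
    (xs : List Int) (a b c : List Int) :
    xs.foldl (fun (acc : List Int × List Int × List Int) sc =>
      if P sc then (acc.1 ++ [sc], acc.2.1, acc.2.2)
      else if Q sc then (acc.1, acc.2.1 ++ [sc], acc.2.2)
      else (acc.1, acc.2.1, acc.2.2 ++ [sc])) (a, b, c)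
    = (a ++ xs.filter (fun x => decide (P x)),
       b ++ xs.filter (fun x => !decide (P x) && decide (Q x)),
       c ++ xs.filter (fun x => !decide (P x) && !decide (Q x))) := by
  induction xs generalizing a b c with
  | nil => simp
  | cons x xs ih =>
    by_cases hp : P x
    · simp [List.foldl_cons, hp, ih]
    · by_cases hq : Q x <;> simp [List.foldl_cons, hp, hq, ih]

-- Closed form of A's two-way (light mode) classifying fold.
theorem foldl_classify2 (P : Int → Prop) [DecidablePred P]
    (xs : List Int) (a b c : List Int) :
    xs.foldl (fun (acc : List Int × List Int × List Int) sc =>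
      if P sc then (acc.1 ++ [sc], acc.2.1, acc.2.2)
      else (acc.1, acc.2.1, acc.2.2 ++ [sc])) (a, b, c)
    = (a ++ xs.filter (fun x => decide (P x)), b,
       c ++ xs.filter (fun x => !decide (P x))) := by
  induction xs generalizing a b c with
  | nil => simp
  | cons x xs ih => by_cases hp : P x <;> simp [List.foldl_cons, hp, ih]

-- The three filters partition the list (lengths add up).
theorem tripart (P Q : Int → Prop) [DecidablePred P] [DecidablePred Q] (xs : List Int) :
    (xs.filter (fun x => decide (P x))).length
      + (xs.filter (fun x => !decide (P x) && decide (Q x))).length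
      + (xs.filter (fun x => !decide (P x) && !decide (Q x))).length = xs.length := by
  induction xs with
  | nil => simp
  | cons x xs ih =>
    by_cases hp : P x
    · simp [hp]; omega
    · by_cases hq : Q x <;> simp [hp, hq] <;> omega

-- list.count as a filter length.
theorem count_eq_filter_len (xs : List Int) (v : Int) :
    (xs.count v : Int) = ((xs.filter (fun x => x == v)).length : Int) := by
  induction xs with
  | nil => simp
  | cons x xs ih =>
    by_cases hx : x = v <;> simp [hx] <;> omega

theorem simulate_verify_py_spec' (source_counts : List Int) (mode : String) :
    simulate_verify_py source_counts mode = simulate_verify_py_alt source_counts mode := by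
  by_cases h1 : mode = "strict"
  · have hcount : source_counts.filter (fun x => !decide ((3 : Int) ≤ x) && decide (x = 2))
        = source_counts.filter (fun x => x == 2) := by
      apply List.filter_congr
      intro x _
      by_cases hx : x = 2 <;> simp [hx]
    have htri := tripart (fun sc => (3 : Int) ≤ sc) (fun sc => sc = 2) source_counts
    rw [hcount] at htri
    simp [simulate_verify_py, simulate_verify_py_alt, h1,
      foldl_classify (fun sc => (3 : Int) ≤ sc) (fun sc => sc = 2), hcount,
      PySem.List.count]
    have hc := count_eq_filter_len source_counts 2
    omega
  · by_cases h2 : mode = "moderate"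
    · have hcount : source_counts.filter (fun x => !decide ((2 : Int) ≤ x) && decide (x = 1))
          = source_counts.filter (fun x => x == 1) := by
        apply List.filter_congr
        intro x _
        by_cases hx : x = 1 <;> simp [hx]
      have htri := tripart (fun sc => (2 : Int) ≤ sc) (fun sc => sc = 1) source_counts
      rw [hcount] at htri
      simp [simulate_verify_py, simulate_verify_py_alt, h2,
        foldl_classify (fun sc => (2 : Int) ≤ sc) (fun sc => sc = 1), hcount,
        PySem.List.count]
      have hc := count_eq_filter_len source_counts 1
      omega
    · have htri := tripart (fun sc => (1 : Int) ≤ sc) (fun _ => False) source_counts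
      simp at htri
      simp [simulate_verify_py, simulate_verify_py_alt, h1, h2,
        foldl_classify2 (fun sc => (1 : Int) ≤ sc)]
      omega

-- ===== VERDICT (by name: the statement is the Claim_ definition above) =====
theorem simulate_verify_py_spec : Claim_equal_simulate_verify_py := by
  intro xs mode _
  exact simulate_verify_py_spec' xs mode
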